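-- pv_equiv track=rewrite | github.com/priyal-it/Python-Basics | 81-mock1.py | good_years
-- ===== SOURCE A (Python) =====
-- def good_years(papers):
--     max_val=0
--     for x in papers:
--         if x[1]>max_val:
--             max_val=x[1]
--     years=[]
--     for x in papers:
--         if x[1]==max_val:
--             years.append(x[0])
--     return years
-- ===== SOURCE B (Python) =====
-- def good_years(papers):
--     best = 0
--     years = []
--     for x in papers:
--         if x[1] > best:
--             best = x[1]
--             years = [x[0]]
--         elif x[1] == best:
--             years.append(x[0])
--     return years
-- ===== Notes on version B (the rewrite author's own statement) =====
-- stated objective: alternative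
-- what changed: Fused A's two passes (find max, then collect) into one sweep that maintains the running max together with its witness list, resetting the list on a new max.
import Mathlib
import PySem

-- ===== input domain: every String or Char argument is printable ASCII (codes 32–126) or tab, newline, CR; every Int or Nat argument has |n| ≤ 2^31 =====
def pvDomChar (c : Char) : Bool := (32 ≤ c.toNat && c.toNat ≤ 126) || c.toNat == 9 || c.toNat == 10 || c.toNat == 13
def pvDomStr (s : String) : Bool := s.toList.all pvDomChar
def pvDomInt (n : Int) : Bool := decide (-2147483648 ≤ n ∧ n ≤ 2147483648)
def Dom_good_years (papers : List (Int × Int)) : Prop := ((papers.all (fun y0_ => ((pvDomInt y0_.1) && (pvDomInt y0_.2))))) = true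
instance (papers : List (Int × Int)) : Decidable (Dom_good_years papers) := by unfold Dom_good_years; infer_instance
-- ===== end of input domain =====

-- B fuses A's two passes into a single sweep maintaining the running max and its witness list (objective: alternative single-pass decomposition).
-- ===== PORT A =====
def good_years (papers : List (Int × Int)) : List Int :=
  let max_val := papers.foldl (fun m x => if x.2 > m then x.2 else m) 0
  papers.foldl (fun years x => if x.2 == max_val then years ++ [x.1] else years) []

-- ===== PORT B =====
def good_years_alt (papers : List (Int × Int)) : List Int :=
  (papers.foldl (fun (st : Int × List Int) x =>
    if x.2 > st.1 then (x.2, [x.1])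
    else if x.2 == st.1 then (st.1, st.2 ++ [x.1])
    else st) (0, [])).2

-- ===== PRECONDITION & SPEC =====
def Spec_good_years (papers : List (Int × Int)) (out : List Int) : Prop := out = good_years_alt papers
instance (papers : List (Int × Int)) (out : List Int) : Decidable (Spec_good_years papers out) := by unfold Spec_good_years; infer_instance

-- ===== CLAIM (what is proved, stated in full; the proofs are below) =====
def Claim_equal_good_years : Prop := ∀ (papers : List (Int × Int)), Dom_good_years papers → Spec_good_years papers (good_years papers)

-- ===== LEMMAS AND PROOFS =====

-- ===== VERDICT (by name: the statement is the Claim_ definition above) =====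
def maxF (papers : List (Int × Int)) (b : Int) : Int :=
  papers.foldl (fun m x => if x.2 > m then x.2 else m) b

def collectF (papers : List (Int × Int)) (M : Int) (acc : List Int) : List Int :=
  papers.foldl (fun years x => if x.2 == M then years ++ [x.1] else years) acc

theorem le_maxF (papers : List (Int × Int)) (b : Int) : b ≤ maxF papers b := by
  induction papers generalizing b with
  | nil => simp [maxF]
  | cons x rest ih =>
    simp only [maxF, List.foldl_cons]
    split_ifs with h
    · exact le_trans (le_of_lt h) (ih x.2)
    · exact ih b

theorem foldB_eq (papers : List (Int × Int)) (b : Int) (ys : List Int) :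
    papers.foldl (fun (st : Int × List Int) x =>
      if x.2 > st.1 then (x.2, [x.1])
      else if x.2 == st.1 then (st.1, st.2 ++ [x.1])
      else st) (b, ys)
    = (maxF papers b, collectF papers (maxF papers b) (if maxF papers b = b then ys else [])) := by
  induction papers generalizing b ys with
  | nil => simp [maxF, collectF]
  | cons x rest ih =>
    simp only [List.foldl_cons]
    by_cases h1 : x.2 > b
    · simp only [if_pos h1, ih]
      have hM : maxF (x :: rest) b = maxF rest x.2 := by
        simp [maxF, List.foldl_cons, if_pos h1]
      have hMb : ¬ maxF rest x.2 = b := by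
        have := le_maxF rest x.2; omega
      rw [hM]
      simp only [collectF, List.foldl_cons, if_neg hMb]
      by_cases h2 : maxF rest x.2 = x.2
      · simp [h2]
      · have : ¬ (x.2 == maxF rest x.2) = true := by simp; omega
        simp [this, h2]
    · have hM : maxF (x :: rest) b = maxF rest b := by
        simp [maxF, List.foldl_cons, if_neg h1]
      simp only [if_neg h1]
      by_cases h2 : (x.2 == b)
      · simp only [if_pos h2, ih]
        rw [hM]
        simp only [collectF, List.foldl_cons]
        by_cases h3 : maxF rest b = b
        · have hx : (x.2 == maxF rest b) = true := by simp at h2 ⊢; omega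
          simp [h3, hx]
          simp [show x.2 = b by simpa using h2]
        · have hx : ¬ (x.2 == maxF rest b) = true := by
            have := le_maxF rest b; simp at h2 ⊢; omega
          simp [h3, hx]
      · simp only [if_neg h2, ih]
        rw [hM]
        simp only [collectF, List.foldl_cons]
        have hlt : x.2 < b := by simp at h2; omega
        have hx : ¬ (x.2 == maxF rest b) = true := by
          have := le_maxF rest b; simp; omega
        simp [hx]

theorem good_years_spec : Claim_equal_good_years := by
  intro papers _
  unfold Spec_good_years good_years good_years_alt
  rw [foldB_eq]
  split_ifs <;> rfl
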